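-- pv_equiv track=rewrite | github.com/alicechamberlin/bort | cogs/fontgame.py | get_fontname
-- ===== SOURCE A (Python) =====
-- def get_fontname(font_file):
--     name = font_file[:-4]
--     chars = ['-', '[', '_']
--     for c in chars:
--         index = name.find(c)
--         if index != -1:
--             name = name[:index]
--     newname = ''
--     for i in range(len(name)):
--         if i > 0 and name[i].isupper() and name[i-1].islower():
--             newname += ' ' + name[i]
--         else:
--             newname += name[i]
--     return newname
-- ===== SOURCE B (Python) =====
-- def get_fontname(font_file):
--     out = []
--     prev = ''
--     for ch in font_file[:-4]:
--         if ch in ('-', '[', '_'):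
--             break
--         if prev.islower() and ch.isupper():
--             out.append(' ')
--         out.append(ch)
--         prev = ch
--     return ''.join(out)
-- ===== Notes on version B (the rewrite author's own statement) =====
-- stated objective: alternative
-- what changed: B replaces A's three separate find-and-slice truncation passes plus a second index-based spacing loop with a single left-to-right traversal that breaks at the first delimiter and inserts a space using a previous-character register.
import Mathlib
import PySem

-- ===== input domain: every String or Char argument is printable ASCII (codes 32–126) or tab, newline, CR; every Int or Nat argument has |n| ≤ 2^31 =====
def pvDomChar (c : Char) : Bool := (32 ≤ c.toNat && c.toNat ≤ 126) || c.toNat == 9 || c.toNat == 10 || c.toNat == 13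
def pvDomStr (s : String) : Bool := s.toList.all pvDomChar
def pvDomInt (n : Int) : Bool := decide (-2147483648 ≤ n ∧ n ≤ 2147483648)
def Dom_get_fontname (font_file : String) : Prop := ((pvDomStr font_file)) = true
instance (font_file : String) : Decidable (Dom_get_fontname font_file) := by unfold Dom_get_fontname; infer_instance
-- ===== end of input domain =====

-- B fuses A's three truncation passes and the separate camel-case spacing pass into one
-- left-to-right traversal with a 'previous character' register (objective: alternative decomposition).

-- ===== PORT A =====
-- one iteration of A's `for c in chars` truncation loop
def pvTrunc (name : List Char) (c : Char) : List Char :=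
  if PySem.Chars.find name [c] ≠ -1 then
    PySem.List.slice name none (some (PySem.Chars.find name [c]))
  else name

-- one iteration of A's `for i in range(len(name))` loop (name[i] is always in range in Python)
def pvSpaceStep (name : List Char) (acc : List Char) (i : Nat) : List Char :=
  if decide (0 < i) && PySem.Chars.isupper ((PySem.List.pyGet? name (i : Int)).getD ' ')
      && PySem.Chars.islower ((PySem.List.pyGet? name ((i : Int) - 1)).getD ' ') then
    acc ++ [' ', (PySem.List.pyGet? name (i : Int)).getD ' ']
  else
    acc ++ [(PySem.List.pyGet? name (i : Int)).getD ' ']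

-- name = font_file[:-4] truncated by the `for c in chars` loop
def pvNameA (font_file : String) : List Char :=
  ['-', '[', '_'].foldl pvTrunc (PySem.List.slice font_file.toList none (some (-4)))

def get_fontname (font_file : String) : String :=
  String.mk ((List.range (pvNameA font_file).length).foldl (pvSpaceStep (pvNameA font_file)) [])

-- ===== PORT B =====
def pvIsDelim (c : Char) : Bool := c == '-' || c == '[' || c == '_'

-- `prev.islower()` where prev is '' (none) or the last kept character
def pvLowOpt : Option Char → Bool
  | some p => PySem.Chars.islower p
  | none => false

-- B's single loop: break at the first delimiter, else space before a lower→upper step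
def pvAltLoop : List Char → Option Char → List Char → List Char
  | [], _, acc => acc
  | ch :: rest, prev, acc =>
    if pvIsDelim ch then acc
    else pvAltLoop rest (some ch)
      (if pvLowOpt prev && PySem.Chars.isupper ch then acc ++ [' ', ch] else acc ++ [ch])

def get_fontname_alt (font_file : String) : String :=
  String.mk (pvAltLoop (PySem.List.slice font_file.toList none (some (-4))) none [])

-- ===== PRECONDITION & SPEC =====
def Spec_get_fontname (font_file : String) (out : String) : Prop := out = get_fontname_alt font_file
instance (font_file : String) (out : String) : Decidable (Spec_get_fontname font_file out) := by unfold Spec_get_fontname; infer_instance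

-- ===== CLAIM (what is proved, stated in full; the proofs are below) =====
def Claim_equal_get_fontname : Prop := ∀ (font_file : String), Dom_get_fontname font_file → Spec_get_fontname font_file (get_fontname font_file)

-- ===== LEMMAS AND PROOFS =====

-- the last character seen so far (B's `prev` after consuming a list)
def pvLastP : List Char → Option Char → Option Char
  | [], prev => prev
  | c :: t, _ => pvLastP t (some c)

-- the output of B's loop as a pure function of the consumed prefix
def pvG : Option Char → List Char → List Char
  | _, [] => []
  | prev, c :: r =>
    (if pvLowOpt prev && PySem.Chars.isupper c then [' ', c] else [c]) ++ pvG (some c) r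

theorem pvAltLoop_eq (cs : List Char) : ∀ (prev : Option Char) (acc : List Char),
    pvAltLoop cs prev acc = acc ++ pvG prev (cs.takeWhile (fun c => !pvIsDelim c)) := by
  induction cs with
  | nil => intro prev acc; simp [pvAltLoop, pvG]
  | cons c r ih =>
    intro prev acc
    by_cases h : pvIsDelim c = true
    · simp [pvAltLoop, h, List.takeWhile_cons, pvG]
    · simp only [Bool.not_eq_true] at h
      simp [pvAltLoop, h, List.takeWhile_cons, pvG, ih]
      split <;> simp

theorem pvG_snoc (t : List Char) : ∀ (prev : Option Char) (c : Char),
    pvG prev (t ++ [c]) =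
      pvG prev t ++ (if pvLowOpt (pvLastP t prev) && PySem.Chars.isupper c then [' ', c] else [c]) := by
  induction t with
  | nil => intro prev c; simp [pvG, pvLastP]
  | cons d r ih => intro prev c; simp [pvG, pvLastP, ih]

theorem pvLastP_eq (t : List Char) : ∀ prev, pvLastP t prev = (t.getLast?).elim prev some := by
  induction t with
  | nil => intro prev; simp [pvLastP]
  | cons c r ih =>
    intro prev
    cases r with
    | nil => simp [pvLastP]
    | cons d s =>
      rw [show pvLastP (c :: d :: s) prev = pvLastP (d :: s) (some c) from rfl, ih,
        List.getLast?_cons_cons]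
      cases h : (d :: s).getLast? with
      | none => simp [List.getLast?_eq_none_iff] at h
      | some x => simp

-- A's index loop computes the same thing as pvG
theorem pvAloop_eq (t : List Char) :
    (List.range t.length).foldl (pvSpaceStep t) [] = pvG none t := by
  induction t using List.reverseRecOn with
  | nil => simp [pvG]
  | append_singleton t c ih =>
    rw [List.length_append, List.length_cons, List.length_nil, Nat.add_zero,
      List.range_succ, List.foldl_append]
    have hcongr : (List.range t.length).foldl (pvSpaceStep (t ++ [c])) [] =
        (List.range t.length).foldl (pvSpaceStep t) [] := by
      apply PySem.List.foldl_congr_mem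
      intro acc i hi
      have hi' : i < t.length := List.mem_range.mp hi
      have h1 : PySem.List.pyGet? (t ++ [c]) (i : Int) = PySem.List.pyGet? t (i : Int) := by
        rw [PySem.List.pyGet?_natCast, PySem.List.pyGet?_natCast,
          List.getElem?_append_left hi']
      rcases Nat.eq_zero_or_pos i with h0 | h0
      · subst h0
        have hz : decide (0 < 0) = false := rfl
        simp only [pvSpaceStep, hz, Bool.false_and, Bool.false_eq_true, if_false, h1]
      · have h2 : PySem.List.pyGet? (t ++ [c]) ((i : Int) - 1) =
            PySem.List.pyGet? t ((i : Int) - 1) := by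
          have he : ((i : Int) - 1) = ((i - 1 : Nat) : Int) := by omega
          rw [he, PySem.List.pyGet?_natCast, PySem.List.pyGet?_natCast,
            List.getElem?_append_left (by omega)]
        simp [pvSpaceStep, h1, h2]
    rw [hcongr, ih, List.foldl_cons, List.foldl_nil, pvG_snoc, pvLastP_eq]
    have hc : PySem.List.pyGet? (t ++ [c]) ((t.length : Nat) : Int) = some c := by
      rw [PySem.List.pyGet?_natCast]; exact List.getElem?_concat_length
    by_cases ht : t = []
    · subst ht; simp [pvSpaceStep, pvLowOpt, pvG, hc]
    · have hne : t.length ≠ 0 := by simpa using ht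
      have hprev : PySem.List.pyGet? (t ++ [c]) ((t.length : Int) - 1) = t.getLast? := by
        have he : ((t.length : Int) - 1) = ((t.length - 1 : Nat) : Int) := by omega
        rw [he, PySem.List.pyGet?_natCast, List.getElem?_append_left (by omega),
          ← List.getLast?_eq_getElem?]
      cases hgl : t.getLast? with
      | none => exact absurd (List.getLast?_eq_none_iff.mp hgl) ht
      | some d =>
        rw [hgl] at hprev
        simp only [pvSpaceStep, hc, hprev, Option.getD_some, hgl, Option.elim_some, pvLowOpt]
        have hpos : decide (0 < t.length) = true := by
          simpa using Nat.pos_of_ne_zero hne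
        rw [hpos]
        simp only [Bool.true_and]
        by_cases hu : PySem.Chars.isupper c = true <;>
          by_cases hl : PySem.Chars.islower d = true <;> simp [hu, hl]

-- [c] is a prefix of l iff l starts with c
theorem pv_singleton_prefix (c : Char) (l : List Char) : [c] <+: l ↔ l.head? = some c := by
  constructor
  · rintro ⟨t, rfl⟩; rfl
  · intro h
    cases l with
    | nil => simp at h
    | cons d r => simp at h; subst h; exact ⟨r, rfl⟩

-- [c] is an infix of l iff c ∈ l
theorem pv_singleton_infix (c : Char) (l : List Char) : [c] <:+: l ↔ c ∈ l := by
  constructor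
  · intro h; exact h.subset (by simp)
  · intro h
    obtain ⟨s, t, rfl⟩ := List.append_of_mem h
    exact ⟨s, t, by simp⟩

theorem pv_take_eq_takeWhile (c : Char) : ∀ (n : Nat) (l : List Char),
    l[n]? = some c → (∀ i < n, l[i]? ≠ some c) →
    l.take n = l.takeWhile (fun a => !(a == c)) := by
  intro n
  induction n with
  | zero =>
    intro l h _
    cases l with
    | nil => simp at h
    | cons d r => simp at h; subst h; simp [List.takeWhile_cons]
  | succ m ih =>
    intro l h hmin
    cases l with
    | nil => simp at h
    | cons d r =>
      have hd : ¬ (d == c) = true := by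
        intro hdc
        exact hmin 0 (Nat.succ_pos m) (by simp_all)
      simp only [List.take_succ_cons, List.takeWhile_cons, hd, Bool.not_eq_true',
        Bool.not_true, if_true]
      simp only [List.cons.injEq, true_and]
      exact ih r (by simpa using h) (fun i hi => by
        have := hmin (i + 1) (by omega); simpa using this)

-- one truncation pass of A is takeWhile (≠ c)
theorem pvTrunc_eq (name : List Char) (c : Char) :
    pvTrunc name c = name.takeWhile (fun a => !(a == c)) := by
  unfold pvTrunc
  by_cases h : PySem.Chars.find name [c] = -1
  · have hnm : c ∉ name := by
      rw [PySem.Chars.find_eq_neg_one_iff] at h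
      exact fun hc => h ((pv_singleton_infix c name).mpr hc)
    rw [if_neg (by simp [h])]
    rw [List.takeWhile_eq_self_iff.mpr]
    intro a ha
    simp only [Bool.not_eq_eq_eq_not, Bool.not_true, beq_eq_false_iff_ne]
    exact fun he => hnm (he ▸ ha)
  · rw [if_pos (by simp [h])]
    have hpos : 0 ≤ PySem.Chars.find name [c] := by
      have := PySem.Chars.neg_one_le_find name [c]
      omega
    obtain ⟨hpre, hmin⟩ := PySem.Chars.find_spec (s := name) (sub := [c]) hpos
    rw [PySem.List.slice_to name hpos]
    apply pv_take_eq_takeWhile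
    · rw [pv_singleton_prefix] at hpre
      rwa [List.head?_drop] at hpre
    · intro i hi hget
      apply hmin i hi
      rw [pv_singleton_prefix, List.head?_drop]
      exact hget

theorem pv_trunc3_eq (nm : List Char) :
    ['-', '[', '_'].foldl pvTrunc nm = nm.takeWhile (fun c => !pvIsDelim c) := by
  simp only [List.foldl_cons, List.foldl_nil, pvTrunc_eq, List.takeWhile_takeWhile]
  congr 1
  funext a
  by_cases h1 : a = '-' <;> by_cases h2 : a = '[' <;> by_cases h3 : a = '_' <;>
    simp [pvIsDelim, h1, h2, h3]

-- ===== VERDICT (by name: the statement is the Claim_ definition above) =====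
theorem get_fontname_spec : Claim_equal_get_fontname := by
  intro font_file _
  unfold Spec_get_fontname get_fontname get_fontname_alt pvNameA
  rw [pvAltLoop_eq, pv_trunc3_eq, pvAloop_eq]
  simp
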